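-- pv_equiv track=rewrite | github.com/fdas3213/Leetcode | 777-swap-adjacent-in-lr-string/777-swap-adjacent-in-lr-string.py | canTransform
-- ===== SOURCE A (Python) =====
-- def canTransform(start: str, end: str) -> bool:
--     """
--     Replacing XL with LX = move L to the left by one
--     Replacing RX with XR = move R to the right by one
--     If we remove all the X in both strings, the resulting strings should be the same.
--     """
--     if start.replace('X','') != end.replace('X', ''):
--         return False
--
--     #their relative positions should be correct. The index of L in the start string
--     #should be >= its corresponding L index in the end string
--     Lstart = [i for i,c in enumerate(start) if c=='L']
--     Lend = [i for i,c in enumerate(end) if c=='L']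
--
--     Rstart = [i for i,c in enumerate(start) if c=='R']
--     Rend = [i for i,c in enumerate(end) if c=='R']
--
--     for s,e in zip(Lstart, Lend):
--         if s<e:
--             return False
--
--     for s,e in zip(Rstart, Rend):
--         if s>e:
--             return False
--
--     return True
-- ===== SOURCE B (Python) =====
-- def canTransform(start: str, end: str) -> bool:
--     # Two-pointer scan over the non-X characters of both strings.
--     n, m = len(start), len(end)
--     i = j = 0
--     while True:
--         while i < n and start[i] == 'X':
--             i += 1
--         while j < m and end[j] == 'X':
--             j += 1
--         if i == n or j == m:
--             return i == n and j == m
--         c = start[i]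
--         if c != end[j]:
--             return False
--         if c == 'L' and i < j:
--             return False
--         if c == 'R' and i > j:
--             return False
--         i += 1
--         j += 1
-- ===== Notes on version B (the rewrite author's own statement) =====
-- stated objective: alternative
-- what changed: Replaced A's replace-and-compare plus four enumerate/filter index lists and two zip scans by a single two-pointer scan that walks both strings once, skipping X's and checking the character and index condition pair by pair.
import Mathlib
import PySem

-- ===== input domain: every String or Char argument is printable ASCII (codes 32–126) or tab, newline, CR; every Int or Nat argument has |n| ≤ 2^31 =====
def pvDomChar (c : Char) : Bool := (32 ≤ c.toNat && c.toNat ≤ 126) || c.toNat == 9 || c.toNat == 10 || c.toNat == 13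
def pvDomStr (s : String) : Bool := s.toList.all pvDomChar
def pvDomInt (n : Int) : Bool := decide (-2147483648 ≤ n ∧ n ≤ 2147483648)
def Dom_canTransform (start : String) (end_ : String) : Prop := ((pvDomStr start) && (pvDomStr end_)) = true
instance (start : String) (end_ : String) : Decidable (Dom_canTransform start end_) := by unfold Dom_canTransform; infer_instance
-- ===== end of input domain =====

-- B replaces A's replace-comparison plus four index lists and two zip scans by a single
-- two-pointer scan over both strings (objective: alternative, one pass, O(1) extra space).

-- ===== PORT A =====
-- for s,e in zip(Lstart, Lend): if s<e: return False
def pvCheckGe : List (Int × Int) → Bool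
  | [] => true
  | (s, e) :: rest => if s < e then false else pvCheckGe rest

-- for s,e in zip(Rstart, Rend): if s>e: return False
def pvCheckLe : List (Int × Int) → Bool
  | [] => true
  | (s, e) :: rest => if e < s then false else pvCheckLe rest

def canTransform (start : String) (end_ : String) : Bool :=
  if PySem.Str.replace start "X" "" ≠ PySem.Str.replace end_ "X" "" then false
  else
    let Lstart := ((PySem.List.enumerate start.toList 0).filter (fun p => p.2 == 'L')).map (·.1)
    let Lend := ((PySem.List.enumerate end_.toList 0).filter (fun p => p.2 == 'L')).map (·.1)
    let Rstart := ((PySem.List.enumerate start.toList 0).filter (fun p => p.2 == 'R')).map (·.1)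
    let Rend := ((PySem.List.enumerate end_.toList 0).filter (fun p => p.2 == 'R')).map (·.1)
    pvCheckGe (Lstart.zip Lend) && pvCheckLe (Rstart.zip Rend)

-- ===== PORT B =====
-- while i < n and start[i] == 'X': i += 1   (the fuel argument only makes the loop structurally
-- recursive; the callers always supply enough for the loop to run to its Python end)
def pvSkipX (s : List Char) : Nat → Nat → Nat
  | 0, i => i
  | fuel + 1, i =>
    if h : i < s.length then
      (if s[i] = 'X' then pvSkipX s fuel (i + 1) else i)
    else i

-- the outer 'while True' loop of Source B (fuel likewise only for totality)
def pvTpLoop (s e : List Char) : Nat → Nat → Nat → Bool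
  | 0, _, _ => false
  | fuel + 1, i, j =>
    let i' := pvSkipX s (s.length - i) i
    let j' := pvSkipX e (e.length - j) j
    if h : i' < s.length ∧ j' < e.length then
      let c := s[i']'h.1
      if c ≠ e[j']'h.2 then false
      else if c = 'L' ∧ i' < j' then false
      else if c = 'R' ∧ j' < i' then false
      else pvTpLoop s e fuel (i' + 1) (j' + 1)
    else
      -- Python: if i == n or j == m: return i == n and j == m
      decide (i' = s.length ∧ j' = e.length)

def canTransform_alt (start : String) (end_ : String) : Bool :=
  pvTpLoop start.toList end_.toList (start.toList.length + end_.toList.length + 1) 0 0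

-- ===== PRECONDITION & SPEC =====
def Spec_canTransform (start : String) (end_ : String) (out : Bool) : Prop := out = canTransform_alt start end_
instance (start : String) (end_ : String) (out : Bool) : Decidable (Spec_canTransform start end_ out) := by unfold Spec_canTransform; infer_instance

-- ===== CLAIM (what is proved, stated in full; the proofs are below) =====
def Claim_equal_canTransform : Prop := ∀ (start : String) (end_ : String), Dom_canTransform start end_ → Spec_canTransform start end_ (canTransform start end_)

-- ===== LEMMAS AND PROOFS =====

-- the non-X characters of s (from index k) paired with their indices
def pvAnnot : List Char → Nat → List (Nat × Char)
  | [], _ => []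
  | c :: s, k => if c = 'X' then pvAnnot s (k + 1) else (k, c) :: pvAnnot s (k + 1)

-- B's scan, phrased structurally on the annotated non-X lists
def pvTp : List (Nat × Char) → List (Nat × Char) → Bool
  | [], [] => true
  | [], _ :: _ => false
  | _ :: _, [] => false
  | (i, c) :: t, (j, d) :: u =>
    if c ≠ d then false
    else if c = 'L' ∧ i < j then false
    else if c = 'R' ∧ j < i then false
    else pvTp t u

-- Nat-level versions of A's two zip scans
def pvGeN : List (Nat × Nat) → Bool
  | [] => true
  | (s, e) :: rest => if s < e then false else pvGeN rest

def pvLeN : List (Nat × Nat) → Bool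
  | [] => true
  | (s, e) :: rest => if e < s then false else pvLeN rest

-- the indices of character ch in s, counting from k
def pvIdxs (ch : Char) : List Char → Nat → List Nat
  | [], _ => []
  | c :: s, k => if c = ch then k :: pvIdxs ch s (k + 1) else pvIdxs ch s (k + 1)

theorem pvSkipX_ge (s : List Char) (fuel i : Nat) : i ≤ pvSkipX s fuel i := by
  induction fuel generalizing i with
  | zero => exact Nat.le_refl i
  | succ n ih =>
      rw [pvSkipX]
      by_cases h : i < s.length
      · rw [dif_pos h]
        by_cases hx : s[i] = 'X'
        · rw [if_pos hx]; exact Nat.le_trans (Nat.le_succ i) (ih (i + 1))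
        · rw [if_neg hx]
      · rw [dif_neg h]

theorem pvSkipX_le (s : List Char) (fuel i : Nat) (hi : i ≤ s.length) :
    pvSkipX s fuel i ≤ s.length := by
  induction fuel generalizing i with
  | zero => exact hi
  | succ n ih =>
      rw [pvSkipX]
      by_cases h : i < s.length
      · rw [dif_pos h]
        by_cases hx : s[i] = 'X'
        · rw [if_pos hx]; exact ih (i + 1) h
        · rw [if_neg hx]; exact hi
      · rw [dif_neg h]; exact hi

theorem pvSkipX_not_X? (s : List Char) (fuel i : Nat) (hf : s.length ≤ fuel + i) :
    s[pvSkipX s fuel i]? ≠ some 'X' := by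
  induction fuel generalizing i with
  | zero =>
      rw [pvSkipX, List.getElem?_eq_none_iff.mpr (by omega)]
      simp
  | succ n ih =>
      rw [pvSkipX]
      by_cases h : i < s.length
      · rw [dif_pos h]
        by_cases hx : s[i] = 'X'
        · rw [if_pos hx]; exact ih (i + 1) (by omega)
        · rw [if_neg hx, List.getElem?_eq_getElem h]
          simp [hx]
      · rw [dif_neg h, List.getElem?_eq_none_iff.mpr (by omega)]
        simp

theorem pvSkipX_not_X (s : List Char) (fuel i : Nat) (hf : s.length ≤ fuel + i)
    (h : pvSkipX s fuel i < s.length) : s[pvSkipX s fuel i] ≠ 'X' := by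
  have h? := pvSkipX_not_X? s fuel i hf
  rw [List.getElem?_eq_getElem h] at h?
  intro hc
  exact h? (by rw [hc])

theorem pvAnnot_skip (s : List Char) (fuel i : Nat) :
    pvAnnot (s.drop i) i = pvAnnot (s.drop (pvSkipX s fuel i)) (pvSkipX s fuel i) := by
  induction fuel generalizing i with
  | zero => rw [pvSkipX]
  | succ n ih =>
      rw [pvSkipX]
      by_cases h : i < s.length
      · rw [dif_pos h]
        by_cases hx : s[i] = 'X'
        · rw [if_pos hx, List.drop_eq_getElem_cons h, pvAnnot, if_pos hx]
          exact ih (i + 1)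
        · rw [if_neg hx]
      · rw [dif_neg h]

theorem pvAnnot_cons (s : List Char) (i : Nat) (h : i < s.length) (hx : s[i] ≠ 'X') :
    pvAnnot (s.drop i) i = (i, s[i]) :: pvAnnot (s.drop (i + 1)) (i + 1) := by
  rw [List.drop_eq_getElem_cons h, pvAnnot, if_neg hx]

theorem pvTpLoop_eq_tp (s e : List Char) (fuel i j : Nat) (hi : i ≤ s.length) (hj : j ≤ e.length)
    (hf : (s.length - i) + (e.length - j) < fuel) :
    pvTpLoop s e fuel i j = pvTp (pvAnnot (s.drop i) i) (pvAnnot (e.drop j) j) := by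
  induction fuel generalizing i j with
  | zero => omega
  | succ n ih =>
      rw [pvAnnot_skip s (s.length - i) i, pvAnnot_skip e (e.length - j) j, pvTpLoop]
      have hg1 := pvSkipX_ge s (s.length - i) i
      have hg2 := pvSkipX_ge e (e.length - j) j
      have hsle := pvSkipX_le s (s.length - i) i hi
      have hele := pvSkipX_le e (e.length - j) j hj
      by_cases h : pvSkipX s (s.length - i) i < s.length ∧ pvSkipX e (e.length - j) j < e.length
      · rw [dif_pos h]
        rw [pvAnnot_cons s _ h.1 (pvSkipX_not_X s (s.length - i) i (by omega) h.1),
            pvAnnot_cons e _ h.2 (pvSkipX_not_X e (e.length - j) j (by omega) h.2), pvTp]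
        have ihx := ih (pvSkipX s (s.length - i) i + 1) (pvSkipX e (e.length - j) j + 1)
          (by omega) (by omega) (by omega)
        dsimp only
        split_ifs <;> first | rfl | exact ihx
      · rw [dif_neg h]
        rcases Nat.lt_or_ge (pvSkipX s (s.length - i) i) s.length with h1 | h1
        · have h2 : pvSkipX e (e.length - j) j = e.length := by omega
          rw [pvAnnot_cons s _ h1 (pvSkipX_not_X s (s.length - i) i (by omega) h1), h2]
          simp [pvAnnot, pvTp]
          omega
        · have h1' : pvSkipX s (s.length - i) i = s.length := by omega
          rw [h1']
          rcases Nat.lt_or_ge (pvSkipX e (e.length - j) j) e.length with h2 | h2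
          · rw [pvAnnot_cons e _ h2 (pvSkipX_not_X e (e.length - j) j (by omega) h2)]
            simp [pvAnnot, pvTp]
            omega
          · have h2' : pvSkipX e (e.length - j) j = e.length := by
              omega
            rw [h2']
            simp [pvAnnot, pvTp]

theorem pvReplaceGo_filter (l acc : List Char) (fuel : Nat) (hf : l.length ≤ fuel) :
    PySem.Chars.replace.go ['X'] [] fuel l acc = acc.reverse ++ l.filter (fun c => c != 'X') := by
  induction fuel generalizing l acc with
  | zero =>
      have hl : l = [] := List.eq_nil_of_length_eq_zero (Nat.le_zero.mp hf)
      subst hl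
      rw [PySem.Chars.replace.go]
      simp
  | succ n ih =>
      cases l with
      | nil =>
          rw [PySem.Chars.replace.go]
          · simp
          · omega
      | cons c t =>
          rw [PySem.Chars.replace.go]
          by_cases hc : c = 'X'
          · rw [if_pos (by simp [hc, List.isPrefixOf])]
            have hdrop : List.drop (['X'].length) (c :: t) = t := rfl
            rw [hdrop]
            simp only [List.length_cons] at hf
            rw [ih _ _ (by omega)]
            simp [hc]
          · rw [if_neg (by simp [List.isPrefixOf]; exact fun hh => hc hh.symm)]
            simp only [List.length_cons] at hf
            rw [ih _ (c :: acc) (by omega)]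
            simp [hc]

theorem pvReplace_filter (s : List Char) :
    PySem.Chars.replace s ['X'] [] = s.filter (fun c => c != 'X') := by
  rw [PySem.Chars.replace]
  simp
  rw [pvReplaceGo_filter s [] s.length le_rfl]
  simp

theorem pvAnnot_snd (s : List Char) (k : Nat) :
    (pvAnnot s k).map (·.2) = s.filter (fun c => c != 'X') := by
  induction s generalizing k with
  | nil => rfl
  | cons c s ih =>
      rw [pvAnnot]
      by_cases hc : c = 'X' <;> simp [hc, ih]

theorem pvEnum_filter (ch : Char) (s : List Char) (k : Nat) :
    ((PySem.List.enumerate s (k : Int)).filter (fun p => p.2 == ch)).map (·.1)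
      = (pvIdxs ch s k).map (fun n : Nat => (n : Int)) := by
  induction s generalizing k with
  | nil => rfl
  | cons c s ih =>
      rw [PySem.List.enumerate_cons, pvIdxs]
      have h1 : (k : Int) + 1 = ((k + 1 : Nat) : Int) := by push_cast; ring
      rw [h1, List.filter_cons]
      by_cases hc : c = ch
      · rw [if_pos (by simp [hc]), if_pos hc]
        simp only [List.map_cons]
        exact congrArg _ (ih (k + 1))
      · rw [if_neg (by simp [hc]), ih, if_neg hc]

theorem pvAnnot_filter (ch : Char) (hch : ch ≠ 'X') (s : List Char) (k : Nat) :
    ((pvAnnot s k).filter (fun p => p.2 == ch)).map (·.1) = pvIdxs ch s k := by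
  induction s generalizing k with
  | nil => rfl
  | cons c s ih =>
      rw [pvAnnot, pvIdxs]
      by_cases hc : c = 'X'
      · have hne : c ≠ ch := by rw [hc]; exact fun h => hch h.symm
        rw [if_pos hc, if_neg hne, ih]
      · rw [if_neg hc, List.filter_cons]
        by_cases hc2 : c = ch
        · rw [if_pos (by simp [hc2]), if_pos hc2]
          simp only [List.map_cons]
          exact congrArg _ (ih (k + 1))
        · rw [if_neg (by simp [hc2]), ih, if_neg hc2]

theorem pvCheckGe_cast (l : List (Nat × Nat)) :
    pvCheckGe (l.map (Prod.map (fun n : Nat => (n : Int)) (fun n : Nat => (n : Int)))) = pvGeN l := by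
  induction l with
  | nil => rfl
  | cons p l ih =>
      obtain ⟨a, b⟩ := p
      rw [List.map_cons, pvCheckGe, pvGeN]
      by_cases h : a < b <;> simp [h, ih]

theorem pvCheckLe_cast (l : List (Nat × Nat)) :
    pvCheckLe (l.map (Prod.map (fun n : Nat => (n : Int)) (fun n : Nat => (n : Int)))) = pvLeN l := by
  induction l with
  | nil => rfl
  | cons p l ih =>
      obtain ⟨a, b⟩ := p
      rw [List.map_cons, pvCheckLe, pvLeN]
      by_cases h : b < a <;> simp [h, ih]

-- the key structural fact: B's scan equals A's three checks, on any annotated lists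
theorem pvTp_eq_checks (t u : List (Nat × Char)) :
    pvTp t u =
      (decide (t.map (·.2) = u.map (·.2))
        && pvGeN (((t.filter (fun p => p.2 == 'L')).map (·.1)).zip
                   ((u.filter (fun p => p.2 == 'L')).map (·.1)))
        && pvLeN (((t.filter (fun p => p.2 == 'R')).map (·.1)).zip
                   ((u.filter (fun p => p.2 == 'R')).map (·.1)))) := by
  induction t generalizing u with
  | nil =>
      cases u with
      | nil => rfl
      | cons q u => simp [pvTp]
  | cons p t ih =>
      obtain ⟨i, c⟩ := p
      cases u with
      | nil => simp [pvTp]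
      | cons q u =>
          obtain ⟨j, d⟩ := q
          by_cases hcd : c = d
          · subst hcd
            by_cases hL : c = 'L'
            · subst hL
              by_cases hij : i < j
              · simp [pvTp, pvGeN, hij]
              · simp [pvTp, pvGeN, hij, ih]
            · by_cases hR : c = 'R'
              · subst hR
                by_cases hji : j < i
                · simp [pvTp, pvLeN, hji]
                · simp [pvTp, pvLeN, hji, ih]
              · simp [pvTp, hL, hR, ih]
          · simp [pvTp, hcd]

-- ===== VERDICT (by name: the statement is the Claim_ definition above) =====
theorem canTransform_spec : Claim_equal_canTransform := by
  unfold Claim_equal_canTransform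
  intro start end_ _
  unfold Spec_canTransform canTransform canTransform_alt
  rw [pvTpLoop_eq_tp _ _ _ 0 0 (Nat.zero_le _) (Nat.zero_le _) (by omega),
      List.drop_zero, List.drop_zero, pvTp_eq_checks]
  have hrepl : ∀ (s : String),
      (PySem.Str.replace s "X" "").toList = s.toList.filter (fun c => c != 'X') := by
    intro s
    rw [PySem.Str.toList_replace]
    exact pvReplace_filter s.toList
  have hfeq : (PySem.Str.replace start "X" "" = PySem.Str.replace end_ "X" "")
      ↔ (start.toList.filter (fun c => c != 'X') = end_.toList.filter (fun c => c != 'X')) := by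
    rw [← hrepl, ← hrepl]
    exact ⟨fun h => by rw [h], fun h => String.toList_inj.mp h⟩
  by_cases hrep : PySem.Str.replace start "X" "" = PySem.Str.replace end_ "X" ""
  · rw [if_neg (not_not_intro hrep)]
    have hd : decide ((pvAnnot start.toList 0).map (·.2) = (pvAnnot end_.toList 0).map (·.2)) = true := by
      rw [pvAnnot_snd, pvAnnot_snd]
      exact decide_eq_true (hfeq.mp hrep)
    rw [hd, Bool.true_and]
    rw [pvAnnot_filter 'L' (by decide) start.toList 0, pvAnnot_filter 'L' (by decide) end_.toList 0,
        pvAnnot_filter 'R' (by decide) start.toList 0, pvAnnot_filter 'R' (by decide) end_.toList 0]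
    rw [show (0 : Int) = ((0 : Nat) : Int) from rfl]
    rw [pvEnum_filter 'L' start.toList 0, pvEnum_filter 'L' end_.toList 0,
        pvEnum_filter 'R' start.toList 0, pvEnum_filter 'R' end_.toList 0]
    dsimp only
    rw [List.zip_map, List.zip_map, pvCheckGe_cast, pvCheckLe_cast]
  · rw [if_pos hrep]
    have hne : (pvAnnot start.toList 0).map (·.2) ≠ (pvAnnot end_.toList 0).map (·.2) := by
      rw [pvAnnot_snd, pvAnnot_snd]
      exact fun h => hrep (hfeq.mpr h)
    rw [decide_eq_false hne]
    simp
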